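-- pv_equiv track=rewrite | github.com/jschnab/leetcode | arrays/remove_min_beans.py | remove_beans
-- ===== SOURCE A (Python) =====
-- def remove_beans(A):
--     """
--     If we choose to make x bags of beans empty, we should choose the x bags
--     with the least amount of beans, so we first need to sort the array.
--
--     Then, the best way to make all bags have an equal amount is to reduce all
--     bags to have the same number of beans as the smallest bag.
--
--     We iterate over how many bags we make empty and determine the minimum total
--     amount of beans removed.
--
--     Time complexity: sorting is O(nlogn) and the subsequent iteration is O(n)
--     with n the array length, so the overall time complexity is O(nlogn).
--     """
--     A.sort()
--     s = sum(A)
--     length = len(A)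
--
--     # worst case, we make all bags the same size as the smallest
--     result = s - length * A[0]
--
--     # number of beans removed by emptying bags
--     sum_empty_bags = 0
--
--     for i in range(1, length):
--         # make the previous bag empty...
--         sum_empty_bags += A[i - 1]
--         # ...and make all other bags have the same size as the smallest, which
--         # is the current
--         result = min(
--             result,
--             # (1) all removed beans so far, (2) all remaining beans in
--             # bags with index > i, (3) number of beans if all bags with index
--             # > i have the same size as bag i
--             sum_empty_bags
--             + (s - sum_empty_bags - A[i])
--             - A[i] * (length - i - 1),
--         )
--
--     return result
-- ===== SOURCE B (Python) =====
-- def remove_beans(A):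
--     """
--     Bottom-up dynamic programming on the sorted bags, from the largest bag
--     down: for the suffix of bags seen so far, the cheapest equalization
--     either levels every bag in the suffix down to its smallest bag x, or
--     empties bag x entirely and keeps the best solution for the rest.
--     """
--     A.sort()
--     best = 0          # min beans removed for the top one-bag suffix
--     suffix = A[-1]    # sum of the current suffix
--     count = 1         # size of the current suffix
--     for x in reversed(A[:-1]):
--         suffix += x
--         count += 1
--         best = min(suffix - count * x, x + best)
--     return best
-- ===== Notes on version B (the rewrite author's own statement) =====
-- stated objective: alternative
-- what changed: A makes a forward pass tracking the running sum of emptied bags and minimizing a three-term removed-beans expression; B is a backward dynamic program over the sorted bags with recurrence min(level the suffix down to its smallest bag, empty that bag and keep the best for the rest), maintaining suffix sum and count.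
import Mathlib
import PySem

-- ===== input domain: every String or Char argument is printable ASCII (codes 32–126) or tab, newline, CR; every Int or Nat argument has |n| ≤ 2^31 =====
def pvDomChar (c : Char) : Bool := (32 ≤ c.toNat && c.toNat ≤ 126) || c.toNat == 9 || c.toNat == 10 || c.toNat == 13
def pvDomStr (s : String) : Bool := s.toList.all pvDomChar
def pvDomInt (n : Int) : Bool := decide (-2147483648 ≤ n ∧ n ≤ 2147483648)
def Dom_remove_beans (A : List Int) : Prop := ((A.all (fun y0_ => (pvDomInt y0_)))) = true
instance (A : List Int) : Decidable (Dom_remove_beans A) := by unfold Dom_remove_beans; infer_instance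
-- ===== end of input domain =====

-- B replaces A's forward pass (running emptied-bags sum, three-term minimum) with a
-- backward dynamic program over the sorted bags: min(level suffix down to x, empty x + best).
-- Both sort their argument in place; equivalence is about the return value.

-- ===== PORT A =====
def remove_beans (A : List Int) : Int :=
  let As := PySem.List.sorted A (fun x => x) false
  let s := As.sum
  let length : Int := As.length
  -- first-element access: Python raises IndexError on the empty list; exact on Pre_ (A ≠ nil)
  let result := s - length * (PySem.List.pyGet? As 0).getD 0
  let st := (PySem.List.pyRange 1 length 1).foldl
    (fun (p : Int × Int) i =>
      let se := p.1 + (PySem.List.pyGet? As (i - 1)).getD 0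
      (se, min p.2 (se + (s - se - (PySem.List.pyGet? As i).getD 0)
                      - (PySem.List.pyGet? As i).getD 0 * (length - i - 1))))
    (0, result)
  st.2

-- ===== PORT B =====
def remove_beans_alt (A : List Int) : Int :=
  let As := PySem.List.sorted A (fun x => x) false
  let best : Int := 0
  -- A[-1]: Python raises IndexError on the empty list; exact on Pre_ (A ≠ nil)
  let suffix := (PySem.List.pyGet? As (-1)).getD 0
  let count : Int := 1
  let st := ((PySem.List.slice As none (some (-1))).reverse).foldl
    (fun (p : Int × Int × Int) x =>
      let suffix := p.2.1 + x
      let count := p.2.2 + 1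
      (min (suffix - count * x) (x + p.1), suffix, count))
    (best, suffix, count)
  st.1

-- ===== PRECONDITION & SPEC =====
-- Pre_ excludes exactly the empty list, where both Pythons raise IndexError.
def Pre_remove_beans (A : List Int) : Prop := A ≠ []
instance (A : List Int) : Decidable (Pre_remove_beans A) := by unfold Pre_remove_beans; infer_instance
def pvWitness_remove_beans : List Int := [4, 1, 6, 5]

def Spec_remove_beans (A : List Int) (out : Int) : Prop := out = remove_beans_alt A
instance (A : List Int) (out : Int) : Decidable (Spec_remove_beans A out) := by unfold Spec_remove_beans; infer_instance

-- ===== CLAIM (what is proved, stated in full; the proofs are below) =====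
def Claim_equal_remove_beans : Prop := ∀ (A : List Int), Dom_remove_beans A → Pre_remove_beans A → Spec_remove_beans A (remove_beans A)

-- ===== LEMMAS AND PROOFS =====

-- Common yardstick: pvMx l = max over positions j of l[j] * (l.length - j), structurally.
def pvMx : List Int → Int
  | [] => 0
  | [z] => z
  | v :: w :: m => max (v * ((m.length : Int) + 2)) (pvMx (w :: m))

lemma pvMx_cons (v : Int) (m : List Int) (h : m ≠ []) :
    pvMx (v :: m) = max (v * ((m.length : Int) + 1)) (pvMx m) := by
  cases m with
  | nil => exact absurd rfl h
  | cons w t => simp [pvMx]; ring_nf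

-- candidate list for the A side
def pvCands : List Int → List Int
  | [] => []
  | v :: m => v * ((m.length : Int) + 1) :: pvCands m

lemma pv_cands_fold (m : List Int) (h : m ≠ []) : ∀ b : Int,
    (pvCands m).foldl max b = max b (pvMx m) := by
  induction m with
  | nil => exact absurd rfl h
  | cons w t ih =>
    intro b
    cases t with
    | nil => simp [pvCands, pvMx]
    | cons u r =>
      rw [show pvCands (w :: u :: r)
            = w * (((u :: r).length : Int) + 1) :: pvCands (u :: r) from rfl,
          List.foldl_cons, ih (by simp) _, pvMx_cons w (u :: r) (by simp)]
      simp [max_assoc]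

-- A's loop result equals s minus the running maximum of retained beans.
lemma pv_loop_eq (As : List Int) (s n : Int) (L : List Int) :
    ∀ (se b : Int),
      ((L.foldl
        (fun (p : Int × Int) i =>
          ((p.1 + (PySem.List.pyGet? As (i - 1)).getD 0),
           min p.2 ((p.1 + (PySem.List.pyGet? As (i - 1)).getD 0)
                      + (s - (p.1 + (PySem.List.pyGet? As (i - 1)).getD 0) - (PySem.List.pyGet? As i).getD 0)
                      - (PySem.List.pyGet? As i).getD 0 * (n - i - 1))))
        (se, s - b))).2
      = s - L.foldl (fun b i => max b ((PySem.List.pyGet? As i).getD 0 * (n - i))) b := by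
  induction L with
  | nil => intro se b; simp
  | cons x L ih =>
    intro se b
    simp only [List.foldl]
    have key : min (s - b)
        ((se + (PySem.List.pyGet? As (x - 1)).getD 0)
          + (s - (se + (PySem.List.pyGet? As (x - 1)).getD 0) - (PySem.List.pyGet? As x).getD 0)
          - (PySem.List.pyGet? As x).getD 0 * (n - x - 1))
        = s - max b ((PySem.List.pyGet? As x).getD 0 * (n - x)) := by
      generalize (PySem.List.pyGet? As x).getD 0 = v
      generalize (PySem.List.pyGet? As (x - 1)).getD 0 = u
      have hw : v * (n - x - 1) = v * (n - x) - v := by ring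
      rw [hw]
      generalize v * (n - x) = w
      omega
    rw [key]
    exact ih _ _

-- A's index-max fold over range(k, len) equals the max fold over the candidate list of drop k.
lemma pv_range_cands (As : List Int) : ∀ (d : Nat) (k b : Int), 0 ≤ k → d = ((As.length : Int) - k).toNat →
    (PySem.List.pyRange k (As.length : Int) 1).foldl
      (fun b i => max b ((PySem.List.pyGet? As i).getD 0 * ((As.length : Int) - i))) b
    = (pvCands (As.drop k.toNat)).foldl max b := by
  intro d
  induction d with
  | zero =>
    intro k b hk hd
    have hlen : (As.length : Int) ≤ k := by omega
    rw [PySem.List.pyRange_one_eq_nil hlen]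
    have : As.length ≤ k.toNat := by omega
    rw [List.drop_eq_nil_of_le this]
    simp [pvCands]
  | succ d ih =>
    intro k b hk hd
    have hlt : k < (As.length : Int) := by omega
    rw [PySem.List.pyRange_one_cons hlt]
    have hkn : k.toNat < As.length := by omega
    rw [List.drop_eq_getElem_cons hkn]
    simp only [pvCands, List.foldl]
    have hget : (PySem.List.pyGet? As k).getD 0 = As[k.toNat] := by
      rw [PySem.List.pyGet?_of_nonneg As hk, List.getElem?_eq_getElem hkn]
      rfl
    have hlen2 : ((As.drop (k.toNat + 1)).length : Int) + 1 = (As.length : Int) - k := by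
      simp [List.length_drop]; omega
    rw [hget, hlen2, ih (k + 1) _ (by omega) (by omega)]
    have : (k + 1).toNat = k.toNat + 1 := by omega
    rw [this]

-- B's backward loop (as a foldr over the bags below the largest) computes
-- (sum - pvMx, sum, length) of the whole sorted list.
lemma pv_b_fold (z : Int) : ∀ (l : List Int),
    (l.foldr
      (fun x (p : Int × Int × Int) =>
        (min ((p.2.1 + x) - (p.2.2 + 1) * x) (x + p.1), p.2.1 + x, p.2.2 + 1))
      (0, z, 1))
    = ((l ++ [z]).sum - pvMx (l ++ [z]), (l ++ [z]).sum, ((l ++ [z]).length : Int)) := by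
  intro l
  induction l with
  | nil => simp [pvMx]
  | cons v l ih =>
    simp only [List.foldr, ih, List.cons_append]
    have hne : l ++ [z] ≠ [] := by simp
    rw [pvMx_cons v (l ++ [z]) hne]
    have hs : ((v :: (l ++ [z])).sum) = (l ++ [z]).sum + v := by simp; ring
    have hl : (((v :: (l ++ [z])).length : Int)) = ((l ++ [z]).length : Int) + 1 := by simp
    refine Prod.ext ?_ (Prod.ext (by simp [hs]) (by simp))
    simp only [hs]
    generalize hM : pvMx (l ++ [z]) = M
    generalize hS : (l ++ [z]).sum = S
    generalize hC : ((l ++ [z]).length : Int) = C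
    show min (S + v - (C + 1) * v) (v + (S - M)) = S + v - max (v * (C + 1)) M
    have : (C + 1) * v = v * (C + 1) := by ring
    rw [this]
    generalize v * (C + 1) = w
    omega

-- A's whole computation on a nonempty sorted list equals sum - pvMx.
lemma pv_a_eq (As : List Int) (hAne : As ≠ []) :
    (((PySem.List.pyRange 1 (As.length : Int) 1).foldl
      (fun (p : Int × Int) i =>
        ((p.1 + (PySem.List.pyGet? As (i - 1)).getD 0),
         min p.2 ((p.1 + (PySem.List.pyGet? As (i - 1)).getD 0)
                    + (As.sum - (p.1 + (PySem.List.pyGet? As (i - 1)).getD 0) - (PySem.List.pyGet? As i).getD 0)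
                    - (PySem.List.pyGet? As i).getD 0 * ((As.length : Int) - i - 1))))
      (0, As.sum - (As.length : Int) * (PySem.List.pyGet? As 0).getD 0))).2
    = As.sum - pvMx As := by
  have h0 : As.sum - (As.length : Int) * (PySem.List.pyGet? As 0).getD 0
      = As.sum - ((PySem.List.pyGet? As 0).getD 0 * (As.length : Int)) := by ring
  rw [h0, pv_loop_eq As As.sum (As.length : Int) _ 0 _]
  congr 1
  rw [pv_range_cands As ((As.length : Int) - 1).toNat 1 _ (by omega) rfl]
  cases As with
  | nil => exact absurd rfl hAne
  | cons v m =>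
    have hv : (PySem.List.pyGet? (v :: m) 0).getD 0 = v := by
      simp
    rw [hv]
    show (pvCands ((v :: m).drop 1)).foldl max (v * (((v :: m).length : Nat) : Int)) = pvMx (v :: m)
    cases m with
    | nil => simp [pvCands, pvMx]
    | cons w t =>
      simp only [List.drop_one, List.tail_cons]
      rw [pv_cands_fold (w :: t) (by simp) _, pvMx_cons v (w :: t) (by simp)]
      have : v * ((((v :: w :: t).length : Nat) : Int)) = v * (((w :: t).length : Int) + 1) := by
        simp
      rw [this]

-- B's whole computation on a nonempty sorted list equals sum - pvMx.
lemma pv_b_eq (As : List Int) (hAne : As ≠ []) :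
    ((((PySem.List.slice As none (some (-1))).reverse).foldl
      (fun (p : Int × Int × Int) x =>
        (min ((p.2.1 + x) - (p.2.2 + 1) * x) (x + p.1), p.2.1 + x, p.2.2 + 1))
      ((0 : Int), (PySem.List.pyGet? As (-1)).getD 0, (1 : Int)))).1
    = As.sum - pvMx As := by
  rcases List.eq_nil_or_concat As with h | ⟨l, z, rfl⟩
  · exact absurd h hAne
  · simp only [List.concat_eq_append]
    rw [PySem.List.slice_to_neg_one, List.dropLast_concat]
    have hget : (PySem.List.pyGet? (l ++ [z]) (-1)).getD 0 = z := by
      rw [PySem.List.pyGet?_neg_one]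
      simp
    rw [hget, List.foldl_reverse]
    rw [pv_b_fold z l]

-- ===== VERDICT (by name: the statement is the Claim_ definition above) =====
theorem remove_beans_spec : Claim_equal_remove_beans := by
  intro A _ hpre
  unfold Spec_remove_beans remove_beans remove_beans_alt
  have hAne : PySem.List.sorted A (fun x => x) false ≠ [] := by
    rw [Ne, PySem.List.sorted_eq_nil_iff]; exact hpre
  simp only []
  rw [pv_a_eq _ hAne, pv_b_eq _ hAne]
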